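-- pv_equiv track=rewrite | github.com/DAVIDDAIJUNCHEN/DigitalSichuan_2020 | 诈骗电话识别/hwk/old/data_process_hwk.py | get_voc_FrequentContactsNum
-- ===== SOURCE A (Python) =====
-- def get_voc_FrequentContactsNum(voc_value):
--     contact_num_dict={}
--     for v in voc_value:
--         if v[0] not in contact_num_dict:
--             contact_num_dict[v[0]]=0
--         contact_num_dict[v[0]] =contact_num_dict[v[0]] +1
--     num=0
--     for c in contact_num_dict.keys():
--         if contact_num_dict[c]>2:
--             num=num+1
--     return num
-- ===== SOURCE B (Python) =====
-- def get_voc_FrequentContactsNum(voc_value):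
--     counts = {}
--     num = 0
--     for v in voc_value:
--         c = counts.get(v[0], 0) + 1
--         counts[v[0]] = c
--         if c == 3:
--             num += 1
--     return num
-- ===== Notes on version B (the rewrite author's own statement) =====
-- stated objective: simpler
-- what changed: Fuses A's two passes into one: the running answer is incremented exactly at the 2->3 transition of a contact's count, so there is no second loop over the dict keys.
import Mathlib
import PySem

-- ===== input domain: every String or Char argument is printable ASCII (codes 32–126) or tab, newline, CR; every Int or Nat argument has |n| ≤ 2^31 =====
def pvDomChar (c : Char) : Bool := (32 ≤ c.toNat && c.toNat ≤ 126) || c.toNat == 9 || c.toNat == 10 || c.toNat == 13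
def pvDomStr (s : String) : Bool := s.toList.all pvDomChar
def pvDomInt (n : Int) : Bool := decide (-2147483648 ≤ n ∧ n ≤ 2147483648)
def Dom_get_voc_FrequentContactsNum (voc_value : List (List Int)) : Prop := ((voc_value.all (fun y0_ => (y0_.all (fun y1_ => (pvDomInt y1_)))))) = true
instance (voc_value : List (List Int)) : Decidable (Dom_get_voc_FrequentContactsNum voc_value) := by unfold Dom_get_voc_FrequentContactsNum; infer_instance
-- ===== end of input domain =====

-- B fuses A's two passes into one, incrementing the running answer exactly when a contact's count reaches 3; same return value, no second loop over keys.


-- ===== PORT A =====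
-- v[0] on an empty v raises IndexError in Python (excluded by Pre_); the .getD 0 only totalises.
def get_voc_FrequentContactsNum (voc_value : List (List Int)) : Int :=
  let d := voc_value.foldl (fun (d : PySem.Dict Int Int) v =>
    let k := (PySem.List.pyGet? v 0).getD 0
    let d := if d.contains k then d else d.insert k 0
    d.insert k (d.getD k 0 + 1)) PySem.Dict.empty
  d.keys.foldl (fun num c => if d.getD c 0 > 2 then num + 1 else num) (0 : Int)

-- ===== PORT B =====
def get_voc_FrequentContactsNum_alt (voc_value : List (List Int)) : Int :=
  (voc_value.foldl (fun (st : PySem.Dict Int Int × Int) v =>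
    let k := (PySem.List.pyGet? v 0).getD 0
    let c := st.1.getD k 0 + 1
    (st.1.insert k c, if c == 3 then st.2 + 1 else st.2)) (PySem.Dict.empty, (0 : Int))).2

-- ===== PRECONDITION & SPEC =====
-- Pre_ excludes exactly the inputs containing an empty inner list, on which v[0] raises IndexError in both A and B.
def Pre_get_voc_FrequentContactsNum (voc_value : List (List Int)) : Prop :=
  ∀ v ∈ voc_value, v ≠ []
instance (voc_value : List (List Int)) : Decidable (Pre_get_voc_FrequentContactsNum voc_value) := by unfold Pre_get_voc_FrequentContactsNum; infer_instance
def pvWitness_get_voc_FrequentContactsNum : List (List Int) := [[1, 7], [1, 3], [2, 5], [1, 4], [1, 9]]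
def Spec_get_voc_FrequentContactsNum (voc_value : List (List Int)) (out : Int) : Prop := out = get_voc_FrequentContactsNum_alt voc_value
instance (voc_value : List (List Int)) (out : Int) : Decidable (Spec_get_voc_FrequentContactsNum voc_value out) := by unfold Spec_get_voc_FrequentContactsNum; infer_instance

-- ===== CLAIM (what is proved, stated in full; the proofs are below) =====
def Claim_equal_get_voc_FrequentContactsNum : Prop := ∀ (voc_value : List (List Int)), Dom_get_voc_FrequentContactsNum voc_value → Pre_get_voc_FrequentContactsNum voc_value → Spec_get_voc_FrequentContactsNum voc_value (get_voc_FrequentContactsNum voc_value)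

-- ===== LEMMAS AND PROOFS =====

-- the number of keys of d whose count exceeds 2 (A's second loop, generalized start)
def countGT2 (d : PySem.Dict Int Int) : Int :=
  d.keys.foldl (fun num c => if d.getD c 0 > 2 then num + 1 else num) 0

lemma foldl_count_if {α : Type} (p : α → Prop) [DecidablePred p] (l : List α) (n : Int) :
    l.foldl (fun num c => if p c then num + 1 else num) n
      = n + ((l.filter (fun c => decide (p c))).length : Int) := by
  induction l generalizing n with
  | nil => simp
  | cons x xs ih =>
    simp only [List.foldl_cons, List.filter_cons, ih]
    by_cases h : p x <;> simp [h] <;> push_cast <;> ring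

lemma filter_length_update {α : Type} [DecidableEq α] (l : List α) (k : α)
    (p q : α → Bool) (hl : l.Nodup) (hk : k ∈ l)
    (hagree : ∀ x ∈ l, x ≠ k → p x = q x) :
    ((l.filter q).length : Int)
      = ((l.filter p).length : Int) + ((if q k then 1 else 0) - (if p k then 1 else 0)) := by
  induction l with
  | nil => cases hk
  | cons x xs ih =>
    rcases List.nodup_cons.mp hl with ⟨hx, hxs⟩
    simp only [List.filter_cons]
    rcases List.mem_cons.mp hk with rfl | hk'
    · have hrest : xs.filter p = xs.filter q := by
        apply List.filter_congr
        intro y hy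
        exact hagree y (List.mem_cons_of_mem _ hy) (fun h => hx (h ▸ hy))
      rw [hrest]
      by_cases hq : q k <;> by_cases hp : p k <;> simp [hq, hp]
    · have hne : x ≠ k := fun h => hx (h ▸ hk')
      have hx' : p x = q x := hagree x List.mem_cons_self hne
      have := ih hxs hk' (fun y hy hyk => hagree y (List.mem_cons_of_mem _ hy) hyk)
      by_cases hp : p x <;> simp [hp, ← hx', this] <;> push_cast <;> ring

-- A's counting step equals a plain counter step
lemma stepA_eq (d : PySem.Dict Int Int) (k : Int) :
    (let d' := if d.contains k then d else d.insert k 0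
     d'.insert k (d'.getD k 0 + 1)) = d.insert k (d.getD k 0 + 1) := by
  by_cases h : d.contains k
  · simp [h]
  · simp only [h, Bool.false_eq_true, if_false]
    rw [PySem.Dict.getD_insert_self, PySem.Dict.insert_insert_self,
        PySem.Dict.getD_of_not_contains d 0 (by simpa using h)]

lemma countGT2_insert (d : PySem.Dict Int Int) (k : Int) (hnd : d.keys.Nodup) :
    countGT2 (d.insert k (d.getD k 0 + 1))
      = countGT2 d + (if d.getD k 0 + 1 == 3 then 1 else 0) := by
  set c := d.getD k 0 + 1 with hc
  unfold countGT2
  rw [foldl_count_if (fun x => (d.insert k c).getD x 0 > 2),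
      foldl_count_if (fun x => d.getD x 0 > 2)]
  by_cases h : d.contains k
  · have hkmem : k ∈ d.keys := (PySem.Dict.contains_iff_mem_keys d k).mp h
    rw [PySem.Dict.keys_insert_of_contains d c h]
    rw [filter_length_update d.keys k
        (fun x => decide (d.getD x 0 > 2)) (fun x => decide ((d.insert k c).getD x 0 > 2))
        hnd hkmem
        (by intro x hx hne; simp [PySem.Dict.getD_insert, hne])]
    simp only [PySem.Dict.getD_insert_self]
    by_cases h3 : c = 3
    · have h2 : d.getD k 0 = 2 := by omega
      simp [h3, h2]
    · have : (c > 2) ↔ (d.getD k 0 > 2) := by omega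
      by_cases h2 : d.getD k 0 > 2 <;> simp_all <;> omega
  · have hkmem : k ∉ d.keys := fun hm => h ((PySem.Dict.contains_iff_mem_keys d k).mpr hm)
    have h0 : d.getD k 0 = 0 := PySem.Dict.getD_of_not_contains d 0 (by simpa using h)
    have hc1 : c = 1 := by omega
    have hfilter : d.keys.filter (fun x => decide ((d.insert k c).getD x 0 > 2))
        = d.keys.filter (fun x => decide (d.getD x 0 > 2)) := by
      apply List.filter_congr
      intro x hx
      have hne : x ≠ k := fun hxk => hkmem (hxk ▸ hx)
      simp [PySem.Dict.getD_insert, hne]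
    rw [PySem.Dict.keys_insert_of_not_contains d c (by simpa using h), List.filter_append, hfilter]
    simp [PySem.Dict.getD_insert_self, hc1]

-- the fused loop invariant: B's running num tracks countGT2 of the shared dict
lemma fused_invariant (l : List (List Int)) (d : PySem.Dict Int Int) (n : Int)
    (hnd : d.keys.Nodup) (hn : n = countGT2 d) :
    (l.foldl (fun (st : PySem.Dict Int Int × Int) v =>
        let k := (PySem.List.pyGet? v 0).getD 0
        let c := st.1.getD k 0 + 1
        (st.1.insert k c, if c == 3 then st.2 + 1 else st.2)) (d, n)).2
      = countGT2 (l.foldl (fun (d : PySem.Dict Int Int) v =>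
          let k := (PySem.List.pyGet? v 0).getD 0
          let d := if d.contains k then d else d.insert k 0
          d.insert k (d.getD k 0 + 1)) d) := by
  induction l generalizing d n with
  | nil => simpa using hn
  | cons v vs ih =>
    simp only [List.foldl_cons]
    rw [stepA_eq]
    set k := (PySem.List.pyGet? v 0).getD 0
    apply ih
    · exact PySem.Dict.nodup_keys_insert d k _ hnd
    · rw [hn, countGT2_insert d k hnd]
      by_cases h3 : d.getD k 0 + 1 == 3 <;> simp [h3]

-- ===== VERDICT (by name: the statement is the Claim_ definition above) =====
theorem get_voc_FrequentContactsNum_spec : Claim_equal_get_voc_FrequentContactsNum := by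
  intro voc_value _ _
  unfold Spec_get_voc_FrequentContactsNum
  exact (fused_invariant voc_value PySem.Dict.empty 0 PySem.Dict.nodup_keys_empty rfl).symm
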